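-- pv_equiv track=rewrite | github.com/Karuwu/tja2osu_plus | tja2osu_plus.py | _read_metadata_block
-- ===== SOURCE A (Python) =====
-- def _read_metadata_block(osu_text: str) -> dict:
--     meta = {"Title":"", "Artist":"", "Creator":"", "Version":""}
--     in_meta = False
--     for ln in osu_text.splitlines():
--         s = ln.strip()
--         if s == "[Metadata]":
--             in_meta = True
--             continue
--         if in_meta and s.startswith("[") and s.endswith("]"):
--             break
--         if in_meta and ":" in s:
--             k, v = s.split(":", 1)
--             k = k.strip()
--             v = v.strip()
--             if k in meta:
--                 meta[k] = v
--     return meta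
-- ===== SOURCE B (Python) =====
-- def _read_metadata_block(osu_text: str) -> dict:
--     meta = {"Title": "", "Artist": "", "Creator": "", "Version": ""}
--     lines = [ln.strip() for ln in osu_text.splitlines()]
--     if "[Metadata]" in lines:
--         body = lines[lines.index("[Metadata]") + 1:]
--         end = next((i for i, s in enumerate(body)
--                     if s.startswith("[") and s.endswith("]")), len(body))
--         for s in body[:end]:
--             if ":" in s:
--                 k, v = s.split(":", 1)
--                 k = k.strip()
--                 if k in meta:
--                     meta[k] = v.strip()
--     return meta
-- ===== Notes on version B (the rewrite author's own statement) =====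
-- stated objective: alternative
-- what changed: Replaced the flag-driven single loop with a pipeline (strip all lines once, locate the [Metadata] header by index, cut the block at the next section header, fold the key:value lines); Pre_ excludes texts whose stripped lines contain the [Metadata] header more than once, where A's accidental continue-past-a-repeated-header behaviour and B's stop-at-any-header are both defensible readings of a malformed file.
import Mathlib
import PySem

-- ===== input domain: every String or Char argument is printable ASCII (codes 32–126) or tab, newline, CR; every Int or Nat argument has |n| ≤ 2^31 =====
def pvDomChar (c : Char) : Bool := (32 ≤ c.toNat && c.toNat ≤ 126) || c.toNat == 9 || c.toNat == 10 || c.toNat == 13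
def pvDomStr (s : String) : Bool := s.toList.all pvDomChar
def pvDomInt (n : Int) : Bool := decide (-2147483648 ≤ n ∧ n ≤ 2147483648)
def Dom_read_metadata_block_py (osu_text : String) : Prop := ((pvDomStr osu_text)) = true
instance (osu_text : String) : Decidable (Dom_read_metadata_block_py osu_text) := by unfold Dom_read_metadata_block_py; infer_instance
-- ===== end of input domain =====

-- B restructures A's flag-driven loop as a strip/index/slice/fold pipeline; same cost, return value proved equal on Pre_.

-- ===== PORT A =====
-- A's for-loop with the in_meta flag and break, as structural recursion over the lines
def pvLoopA : List String → PySem.Dict String String → Bool → PySem.Dict String String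
  | [], dct, _ => dct
  | ln :: rest, dct, in_meta =>
    let s := PySem.Str.strip ln
    if s = "[Metadata]" then pvLoopA rest dct true
    else if in_meta && PySem.Str.startswith s "[" && PySem.Str.endswith s "]" then dct
    else if in_meta && PySem.Str.isIn ":" s then
      -- 'k, v = s.split(":", 1)': the guard ':' in s guarantees exactly two parts
      match PySem.Str.splitMax? s ":" 1 with
      | some (k :: v :: _) =>
        let k := PySem.Str.strip k
        let v := PySem.Str.strip v
        pvLoopA rest (if dct.contains k then dct.insert k v else dct) in_meta
      | _ => pvLoopA rest dct in_meta
    else pvLoopA rest dct in_meta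

def read_metadata_block_py (osu_text : String) : List (String × String) :=
  (pvLoopA (PySem.Str.splitlines osu_text)
    (PySem.Dict.mk [("Title", ""), ("Artist", ""), ("Creator", ""), ("Version", "")]) false).items

-- ===== PORT B =====
-- predicate of B's 'next(...)' generator: a '[...]' section header (on stripped lines)
def pvHeaderP (s : String) : Bool :=
  PySem.Str.startswith s "[" && PySem.Str.endswith s "]"

-- body of B's 'for s in body[:end]' loop
def pvAssignLine (dct : PySem.Dict String String) (s : String) : PySem.Dict String String :=
  if PySem.Str.isIn ":" s then
    match PySem.Str.splitMax? s ":" 1 with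
    | some (k :: v :: _) =>
      let k := PySem.Str.strip k
      if dct.contains k then dct.insert k (PySem.Str.strip v) else dct
    | _ => dct
  else dct

def read_metadata_block_py_alt (osu_text : String) : List (String × String) :=
  let meta0 : PySem.Dict String String :=
    PySem.Dict.mk [("Title", ""), ("Artist", ""), ("Creator", ""), ("Version", "")]
  let lines := (PySem.Str.splitlines osu_text).map PySem.Str.strip
  -- '"[Metadata]" in lines' guard plus 'lines.index(...)' ported as a match on index?
  (match PySem.List.index? lines "[Metadata]" with
   | some i =>
     -- 'body = lines[i+1:]' / 'body[:end]': indices nonnegative and ≤ len, where slice = drop / take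
     let body := lines.drop (i + 1)
     let e := (body.findIdx? pvHeaderP).getD body.length
     (body.take e).foldl pvAssignLine meta0
   | none => meta0).items

-- ===== PRECONDITION & SPEC =====
-- Pre_ excludes texts whose stripped lines contain "[Metadata]" more than once: there A's
-- continue-past-a-repeated-header behaviour is accidental and B naturally stops at any header.
def Pre_read_metadata_block_py (osu_text : String) : Prop :=
  ((PySem.Str.splitlines osu_text).map PySem.Str.strip).count "[Metadata]" ≤ 1
instance (osu_text : String) : Decidable (Pre_read_metadata_block_py osu_text) := by
  unfold Pre_read_metadata_block_py; infer_instance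

def pvWitness_read_metadata_block_py : String := "[Metadata]\nTitle: x\n[Other]"

def Spec_read_metadata_block_py (osu_text : String) (out : List (String × String)) : Prop := out = read_metadata_block_py_alt osu_text
instance (osu_text : String) (out : List (String × String)) : Decidable (Spec_read_metadata_block_py osu_text out) := by unfold Spec_read_metadata_block_py; infer_instance

-- ===== CLAIM (what is proved, stated in full; the proofs are below) =====
def Claim_equal_read_metadata_block_py : Prop := ∀ (osu_text : String), Dom_read_metadata_block_py osu_text → Pre_read_metadata_block_py osu_text → Spec_read_metadata_block_py osu_text (read_metadata_block_py osu_text)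

-- ===== LEMMAS AND PROOFS =====

-- B's phase 2 (cut at next header, fold the lines), as one function of the stripped body
def pvPhase2 (body : List String) (dct : PySem.Dict String String) : PySem.Dict String String :=
  (body.take ((body.findIdx? pvHeaderP).getD body.length)).foldl pvAssignLine dct

theorem pvPhase2_cons_header (s : String) (l : List String) (dct : PySem.Dict String String)
    (h : pvHeaderP s = true) : pvPhase2 (s :: l) dct = dct := by
  simp [pvPhase2, List.findIdx?_cons, h]

theorem pvPhase2_cons_not_header (s : String) (l : List String) (dct : PySem.Dict String String)
    (h : pvHeaderP s = false) :
    pvPhase2 (s :: l) dct = pvPhase2 l (pvAssignLine dct s) := by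
  unfold pvPhase2
  simp only [List.findIdx?_cons, h]
  simp only [List.length_cons]
  cases (l.findIdx? pvHeaderP) <;> simp

-- phase 2 of A (in_meta = true, no further "[Metadata]" line) computes B's pvPhase2
theorem pvLoopA_true (ls : List String) (dct : PySem.Dict String String)
    (hmem : "[Metadata]" ∉ ls.map PySem.Str.strip) :
    pvLoopA ls dct true = pvPhase2 (ls.map PySem.Str.strip) dct := by
  induction ls generalizing dct with
  | nil => simp [pvLoopA, pvPhase2]
  | cons ln rest ih =>
    rw [List.map_cons] at hmem ⊢
    have hm : PySem.Str.strip ln ≠ "[Metadata]" := fun h => hmem (by rw [h]; exact List.mem_cons_self)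
    have hrest : "[Metadata]" ∉ rest.map PySem.Str.strip := fun h => hmem (List.mem_cons_of_mem _ h)
    by_cases hh : pvHeaderP (PySem.Str.strip ln) = true
    · have hA : pvLoopA (ln :: rest) dct true = dct := by
        simp only [pvHeaderP, Bool.and_eq_true] at hh
        show (if PySem.Str.strip ln = "[Metadata]" then _ else _) = dct
        rw [if_neg hm]
        rw [if_pos (by rw [Bool.true_and, hh.1, hh.2]; rfl)]
      rw [hA, pvPhase2_cons_header _ _ _ hh]
    · have hh' : pvHeaderP (PySem.Str.strip ln) = false := Bool.eq_false_iff.mpr hh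
      rw [pvPhase2_cons_not_header _ _ _ hh']
      show (if PySem.Str.strip ln = "[Metadata]" then _ else _) = _
      rw [if_neg hm]
      have hcond : (true && PySem.Str.startswith (PySem.Str.strip ln) "[" &&
          PySem.Str.endswith (PySem.Str.strip ln) "]") = false := by
        simpa [pvHeaderP] using hh'
      rw [if_neg (by rw [hcond]; exact Bool.false_ne_true)]
      unfold pvAssignLine
      by_cases hc : PySem.Str.isIn ":" (PySem.Str.strip ln) = true
      · rw [if_pos (by rw [Bool.true_and]; exact hc), if_pos hc]
        cases hs : PySem.Str.splitMax? (PySem.Str.strip ln) ":" 1 with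
        | none => exact ih _ hrest
        | some parts =>
          match parts with
          | [] => exact ih _ hrest
          | [k] => exact ih _ hrest
          | k :: v :: tl => exact ih _ hrest
      · rw [if_neg (by rw [Bool.true_and]; exact hc), if_neg hc]
        exact ih _ hrest

-- the whole of A (in_meta = false), under the at-most-one-header precondition,
-- computes B's index?-match pipeline
theorem pvLoopA_false (ls : List String) (dct : PySem.Dict String String)
    (hcnt : (ls.map PySem.Str.strip).count "[Metadata]" ≤ 1) :
    pvLoopA ls dct false =
      match PySem.List.index? (ls.map PySem.Str.strip) "[Metadata]" with
      | some i => pvPhase2 ((ls.map PySem.Str.strip).drop (i + 1)) dct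
      | none => dct := by
  induction ls with
  | nil => simp [pvLoopA, PySem.List.index?]
  | cons ln rest ih =>
    rw [List.map_cons] at hcnt ⊢
    by_cases hm : PySem.Str.strip ln = "[Metadata]"
    · rw [hm] at hcnt ⊢
      rw [PySem.List.index?_cons_self]
      have hrest : "[Metadata]" ∉ rest.map PySem.Str.strip := by
        rw [List.count_cons_self] at hcnt
        have : (rest.map PySem.Str.strip).count "[Metadata]" = 0 := by omega
        exact (List.count_eq_zero).mp this
      simpa only [pvLoopA, hm, if_pos rfl, List.drop_succ_cons, List.drop_zero] using
        pvLoopA_true rest dct hrest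
    · have hne : PySem.Str.strip ln ≠ "[Metadata]" := hm
      rw [PySem.List.index?_cons_of_ne _ hne]
      have hrest : (rest.map PySem.Str.strip).count "[Metadata]" ≤ 1 := by
        rw [List.count_cons_of_ne hne] at hcnt
        exact hcnt
      have hA : pvLoopA (ln :: rest) dct false = pvLoopA rest dct false := by
        simp only [pvLoopA]
        rw [if_neg hm]
        rw [if_neg (by rw [Bool.false_and]; exact Bool.false_ne_true)]
        rw [if_neg (by rw [Bool.false_and]; exact Bool.false_ne_true)]
      rw [hA, ih hrest]
      cases PySem.List.index? (rest.map PySem.Str.strip) "[Metadata]" <;> simp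

-- ===== VERDICT (by name: the statement is the Claim_ definition above) =====
theorem read_metadata_block_py_spec : Claim_equal_read_metadata_block_py := by
  intro t _ hpre
  unfold Spec_read_metadata_block_py read_metadata_block_py read_metadata_block_py_alt
  rw [pvLoopA_false _ _ hpre]
  cases hi : List.idxOf? "[Metadata]" ((PySem.Str.splitlines t).map PySem.Str.strip) with
  | none => simp [PySem.List.index?_eq_idxOf?, hi]
  | some i => simp [PySem.List.index?_eq_idxOf?, hi, pvPhase2]
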